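-- pv_equiv track=rewrite | github.com/marklee77/vpack | vectorpack/leinberger.py | pp_select
-- ===== SOURCE A (Python) =====
-- def rank_to_dimension(v):
--     """ compute the ordering on dimensions based on their size.
--         e.g., for a 3D array [2, 0, 1] means that the dimension 2 has the
--         largest value, dimension 0 the next, and dimension 1 the smallest.
--
--         The natural ordering is used to break any ties and thus guarantee a
--         stable sort.
--     """
--     return sorted(range(len(v)), key=lambda d: (-v[d], d)) # stable sort
--
-- def dimension_to_rank(v):
--     """ Provide map that is inverse of above, e.g., can be used to go from a
--         dimension number to a rank for that dimension
--     """
--     d2r = [None] * len(v)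
--     for r, d in enumerate(rank_to_dimension(v)):
--         d2r[d] = r
--     return d2r
--
-- def pp_select(item=None, capacity=None, window_size=None):
--     if window_size is None:
--         window_size = len(capacity)
--     elif window_size == 0:
--         return None
--     r2d_c = rank_to_dimension(capacity)
--     d2r_i = dimension_to_rank(item)
--     return [d2r_i[d] for d in r2d_c[:window_size]]
-- ===== SOURCE B (Python) =====
-- def pp_select(item=None, capacity=None, window_size=None):
--     if window_size is None:
--         window_size = len(capacity)
--     elif window_size == 0:
--         return None
--     r2d_c = sorted(range(len(capacity)), key=lambda d: (-capacity[d], d))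
--     out = []
--     for d in r2d_c[:window_size]:
--         v = item[d]
--         out.append(sum(1 for e in range(len(item))
--                        if item[e] > v or (item[e] == v and e < d)))
--     return out
-- ===== Notes on version B (the rewrite author's own statement) =====
-- stated objective: alternative
-- what changed: The item-side sort (rank_to_dimension) and the inverse-permutation table (dimension_to_rank) are replaced by a direct rank-by-counting pass: each selected dimension's rank is the count of item dimensions with a strictly larger value or an equal value and smaller index.
import Mathlib
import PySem

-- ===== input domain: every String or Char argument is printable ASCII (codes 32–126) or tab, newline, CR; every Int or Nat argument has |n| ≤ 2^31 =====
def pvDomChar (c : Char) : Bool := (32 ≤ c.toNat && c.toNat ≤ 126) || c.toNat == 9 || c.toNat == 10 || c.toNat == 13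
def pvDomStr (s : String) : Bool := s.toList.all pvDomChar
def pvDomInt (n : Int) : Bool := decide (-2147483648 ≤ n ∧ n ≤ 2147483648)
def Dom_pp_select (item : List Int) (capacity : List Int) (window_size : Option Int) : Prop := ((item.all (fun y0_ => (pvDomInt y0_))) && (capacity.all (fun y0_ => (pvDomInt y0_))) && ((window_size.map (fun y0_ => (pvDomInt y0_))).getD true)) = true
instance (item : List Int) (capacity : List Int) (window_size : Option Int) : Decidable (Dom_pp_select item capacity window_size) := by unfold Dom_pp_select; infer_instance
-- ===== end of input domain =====

-- B replaces A's item-side sort + inverse-permutation table by a direct rank-by-counting pass (alternative decomposition, same results).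

-- ===== PORT A =====
-- rank_to_dimension(v) = sorted(range(len(v)), key=lambda d: (-v[d], d))
def pvRankToDim (v : List Int) : List Int :=
  PySem.List.sorted2 (PySem.List.pyRange 0 (v.length : Int))
    (fun d => -(PySem.List.pyGetD v d 0)) (fun d => d)

-- dimension_to_rank(v): d2r = [None]*len(v); for r, d in enumerate(rank_to_dimension(v)): d2r[d] = r
-- (every slot is provably overwritten, so the None placeholder is an Int 0 that is never read)
def pvDimToRank (v : List Int) : List Int :=
  (PySem.List.enumerate (pvRankToDim v) 0).foldl
    (fun acc rd => acc.set rd.2.toNat rd.1) (List.replicate v.length 0)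

def pp_select (item : List Int) (capacity : List Int) (window_size : Option Int) : Option (List Int) :=
  match window_size with
  | none =>
      (PySem.List.slice (pvRankToDim capacity) none (some (capacity.length : Int))).mapM
        (fun d => PySem.List.pyGet? (pvDimToRank item) d)
  | some ws =>
      if ws = 0 then none
      else
        (PySem.List.slice (pvRankToDim capacity) none (some ws)).mapM
          (fun d => PySem.List.pyGet? (pvDimToRank item) d)

-- ===== PORT B =====
def pp_select_alt (item : List Int) (capacity : List Int) (window_size : Option Int) : Option (List Int) :=
  let body := fun (ws : Int) =>
    (PySem.List.slice
        (PySem.List.sorted2 (PySem.List.pyRange 0 (capacity.length : Int))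
          (fun d => -(PySem.List.pyGetD capacity d 0)) (fun d => d))
        none (some ws)).mapM
      (fun d => (PySem.List.pyGet? item d).map (fun v =>
        ((PySem.List.pyRange 0 (item.length : Int)).countP (fun e =>
          decide (PySem.List.pyGetD item e 0 > v) ||
          (decide (PySem.List.pyGetD item e 0 = v) && decide (e < d))) : Int)))
  match window_size with
  | none => body (capacity.length : Int)
  | some ws => if ws = 0 then none else body ws

-- ===== PRECONDITION & SPEC =====
-- 'e ranks before d' for the stable key (-v[d], d): strictly larger value, or equal value and smaller index
def pvR (v : List Int) (e d : Int) : Bool :=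
  decide (PySem.List.pyGetD v e 0 > PySem.List.pyGetD v d 0) ||
  (decide (PySem.List.pyGetD v e 0 = PySem.List.pyGetD v d 0) && decide (e < d))

def pvCapRank (capacity : List Int) (d : Int) : Nat :=
  (PySem.List.pyRange 0 (capacity.length : Int)).countP (fun e => pvR capacity e d)

-- Pre_ is exactly the inputs where A returns normally: it excludes the IndexError raised when some
-- capacity dimension inside the selected window is ≥ len(item) (both Pythons raise IndexError there).
def Pre_pp_select (item : List Int) (capacity : List Int) (window_size : Option Int) : Prop :=
  window_size = some 0 ∨
  (∀ d : Nat, d < capacity.length → item.length ≤ d →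
    PySem.List.clampIdx capacity.length (window_size.getD (capacity.length : Int)) ≤ pvCapRank capacity (d : Int))
instance (item : List Int) (capacity : List Int) (window_size : Option Int) : Decidable (Pre_pp_select item capacity window_size) := by unfold Pre_pp_select; infer_instance

def pvWitness_pp_select : List Int × List Int × Option Int := ([3, 1, 2], [5, 4, 6], none)

def Spec_pp_select (item : List Int) (capacity : List Int) (window_size : Option Int) (out : Option (List Int)) : Prop := out = pp_select_alt item capacity window_size
instance (item : List Int) (capacity : List Int) (window_size : Option Int) (out : Option (List Int)) : Decidable (Spec_pp_select item capacity window_size out) := by unfold Spec_pp_select; infer_instance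

-- ===== CLAIM (what is proved, stated in full; the proofs are below) =====
def Claim_equal_pp_select : Prop := ∀ (item : List Int) (capacity : List Int) (window_size : Option Int), Dom_pp_select item capacity window_size → Pre_pp_select item capacity window_size → Spec_pp_select item capacity window_size (pp_select item capacity window_size)

-- ===== LEMMAS AND PROOFS =====

theorem pv_sorted2_eq_sorted_lex (xs : List Int) (k1 k2 : Int → Int) :
    PySem.List.sorted2 xs k1 k2 =
      PySem.List.sorted xs (fun a => toLex (k1 a, k2 a)) := by
  rw [PySem.List.sorted_eq_foldl_insertBy]
  simp only [PySem.List.sorted2]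
  congr 1; funext acc x; congr 1; funext a b
  simp only [Prod.Lex.toLex_lt_toLex]
  by_cases h1 : k1 a < k1 b <;> by_cases h2 : k1 b < k1 a <;> by_cases h3 : k2 a < k2 b <;>
    simp [h1, h2, h3] <;> omega

theorem pvR_asymm (v : List Int) (a b : Int) (h : pvR v a b = true) : pvR v b a = false := by
  simp only [pvR, Bool.or_eq_true, Bool.and_eq_true, decide_eq_true_eq] at h
  simp only [pvR, Bool.or_eq_false_iff, Bool.and_eq_false_iff, decide_eq_false_iff_not, not_lt]
  omega

theorem pv_perm_rankToDim (v : List Int) :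
    (pvRankToDim v).Perm (PySem.List.pyRange 0 (v.length : Int)) :=
  PySem.List.sorted2_perm _ _ _ _

theorem pv_mem_rankToDim (v : List Int) (d : Int) :
    d ∈ pvRankToDim v ↔ 0 ≤ d ∧ d < (v.length : Int) := by
  rw [(pv_perm_rankToDim v).mem_iff, PySem.List.mem_pyRange_one]

theorem pv_nodup_rankToDim (v : List Int) : (pvRankToDim v).Nodup :=
  (pv_perm_rankToDim v).nodup_iff.mpr (PySem.List.nodup_pyRange_one _ _)

theorem pv_pairwise_rankToDim (v : List Int) :
    (pvRankToDim v).Pairwise (fun a b => pvR v a b = true) := by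
  have hs : pvRankToDim v =
      PySem.List.sorted (PySem.List.pyRange 0 (v.length : Int))
        (fun a => toLex (-(PySem.List.pyGetD v a 0), a)) :=
    pv_sorted2_eq_sorted_lex _ _ _
  have hle := PySem.List.sorted_pairwise (PySem.List.pyRange 0 (v.length : Int))
        (fun a => toLex (-(PySem.List.pyGetD v a 0), a))
  rw [← hs] at hle
  have hnd := pv_nodup_rankToDim v
  refine (hle.and hnd).imp ?_
  intro a b hab
  obtain ⟨hle', hne⟩ := hab
  rcases lt_or_eq_of_le hle' with hlt | heq
  · rw [Prod.Lex.toLex_lt_toLex] at hlt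
    simp only [pvR, Bool.or_eq_true, Bool.and_eq_true, decide_eq_true_eq]
    omega
  · exact absurd (congrArg (fun p => (ofLex p).2) heq) hne

-- in a strictly 'pvR'-ordered list, the index of an element is the number of elements ranked before it
theorem pv_idxOf_eq_countP (v : List Int) (p : List Int)
    (hp : p.Pairwise (fun a b => pvR v a b = true)) (d : Int) (hd : d ∈ p) :
    p.idxOf d = p.countP (fun e => pvR v e d) := by
  induction p with
  | nil => simp at hd
  | cons x t ih =>
    rcases List.pairwise_cons.mp hp with ⟨hx, ht⟩
    by_cases hdx : d = x
    · subst hdx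
      rw [List.idxOf_cons_self, List.countP_cons]
      have hxx : pvR v d d = false := by
        by_cases h : pvR v d d = true
        · have := pvR_asymm v d d h; rw [h] at this; exact absurd this (by simp)
        · simpa using h
      rw [List.countP_eq_zero.mpr ?_]
      · simp [hxx]
      · intro e he
        simp [pvR_asymm v d e (hx e he)]
    · have hdt : d ∈ t := by rcases List.mem_cons.mp hd with h | h; exact absurd h hdx; exact h
      rw [List.idxOf_cons_ne _ (fun h => hdx h.symm), List.countP_cons, ih ht hdt]
      have : pvR v x d = true := hx d hdt
      simp [this]

theorem pv_idxOf_rankToDim (v : List Int) (d : Int) (hd : d ∈ pvRankToDim v) :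
    ((pvRankToDim v).idxOf d : Nat) =
      (PySem.List.pyRange 0 (v.length : Int)).countP (fun e => pvR v e d) := by
  rw [pv_idxOf_eq_countP v _ (pv_pairwise_rankToDim v) d hd]
  exact (pv_perm_rankToDim v).countP_eq _

-- the inverse-permutation loop: the final table maps each dimension to its position in the sorted list
theorem pv_foldl_set_spec (p : List Int) (hnd : p.Nodup) (acc : List Int)
    (hall : ∀ x ∈ p, 0 ≤ x ∧ x.toNat < acc.length) (s : Int) (d : Int) (hd0 : 0 ≤ d) :
    ((PySem.List.enumerate p s).foldl (fun a rd => a.set rd.2.toNat rd.1) acc)[d.toNat]? =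
      if d ∈ p then some (s + (p.idxOf d : Int)) else acc[d.toNat]? := by
  induction p generalizing acc s with
  | nil => simp [PySem.List.enumerate_nil]
  | cons x t ih =>
    rcases List.nodup_cons.mp hnd with ⟨hxt, hndt⟩
    have hx := hall x (by simp)
    rw [PySem.List.enumerate_cons, List.foldl_cons]
    have hall' : ∀ y ∈ t, 0 ≤ y ∧ y.toNat < (acc.set x.toNat s).length := by
      intro y hy; simpa using hall y (by simp [hy])
    rw [ih hndt (acc.set x.toNat s) hall' (s + 1)]
    by_cases hdx : d = x
    · subst hdx
      rw [if_neg hxt, if_pos (by simp)]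
      rw [List.getElem?_set_self (by omega), List.idxOf_cons_self]
      simp
    · by_cases hdt : d ∈ t
      · rw [if_pos hdt, if_pos (by simp [hdt])]
        rw [List.idxOf_cons_ne _ (fun h => hdx h.symm)]
        congr 1
        push_cast
        ring
      · rw [if_neg hdt, if_neg (by simp [hdt, hdx])]
        rw [List.getElem?_set_ne]
        omega

theorem pv_dimToRank_get (v : List Int) (d : Int) (h0 : 0 ≤ d) (h1 : d < (v.length : Int)) :
    PySem.List.pyGet? (pvDimToRank v) d =
      some (((PySem.List.pyRange 0 (v.length : Int)).countP (fun e => pvR v e d) : Int)) := by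
  have hd : d ∈ pvRankToDim v := (pv_mem_rankToDim v d).mpr ⟨h0, h1⟩
  rw [PySem.List.pyGet?_of_nonneg _ h0]
  unfold pvDimToRank
  rw [pv_foldl_set_spec _ (pv_nodup_rankToDim v) _ ?_ 0 d h0]
  · rw [if_pos hd, pv_idxOf_rankToDim v d hd]
    simp
  · intro x hx
    have := (pv_mem_rankToDim v x).mp hx
    constructor
    · exact this.1
    · simp only [List.length_replicate]; omega

theorem pv_mapM_eq_map {α β : Type} (l : List α) (f : α → Option β) (g : α → β)
    (h : ∀ x ∈ l, f x = some (g x)) : l.mapM f = some (l.map g) := by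
  induction l with
  | nil => rfl
  | cons x t ih =>
    rw [List.mapM_cons, h x (by simp), ih (fun y hy => h y (by simp [hy]))]
    rfl

theorem pv_idxOf_lt_of_mem_take {α : Type} [DecidableEq α] (l : List α) (k : Nat) (d : α)
    (hd : d ∈ l.take k) : l.idxOf d < k := by
  induction l generalizing k with
  | nil => simp at hd
  | cons x t ih =>
    cases k with
    | zero => simp at hd
    | succ k =>
      simp only [List.take_succ_cons, List.mem_cons] at hd
      by_cases hx : d = x
      · simp [hx, List.idxOf_cons_self]
      · rcases hd with h | h
        · exact absurd h hx
        · have := ih k h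
          rw [List.idxOf_cons_ne _ (by exact fun hh => hx hh.symm)]
          omega

theorem pv_slice_none_some {α : Type} (xs : List α) (b : Int) :
    PySem.List.slice xs none (some b) = xs.take (PySem.List.clampIdx xs.length b) := by
  simp [PySem.List.slice]

theorem pv_body_eq (item capacity : List Int) (w : Int)
    (hpre : ∀ d : Nat, d < capacity.length → item.length ≤ d →
      PySem.List.clampIdx capacity.length w ≤ pvCapRank capacity (d : Int)) :
    (PySem.List.slice (pvRankToDim capacity) none (some w)).mapM
        (fun d => PySem.List.pyGet? (pvDimToRank item) d) =
    (PySem.List.slice (pvRankToDim capacity) none (some w)).mapM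
      (fun d => (PySem.List.pyGet? item d).map (fun v =>
        ((PySem.List.pyRange 0 (item.length : Int)).countP (fun e =>
          decide (PySem.List.pyGetD item e 0 > v) ||
          (decide (PySem.List.pyGetD item e 0 = v) && decide (e < d))) : Int))) := by
  rw [pv_slice_none_some]
  have hlen : (pvRankToDim capacity).length = capacity.length := by
    have := (pv_perm_rankToDim capacity).length_eq
    simpa [PySem.List.length_pyRange_one] using this
  rw [hlen]
  set k := PySem.List.clampIdx capacity.length w with hk
  set W := (pvRankToDim capacity).take k with hW
  have hbound : ∀ d ∈ W, 0 ≤ d ∧ d < (item.length : Int) := by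
    intro d hd
    have hdm : d ∈ pvRankToDim capacity := List.mem_of_mem_take hd
    obtain ⟨h0, hn⟩ := (pv_mem_rankToDim capacity d).mp hdm
    refine ⟨h0, ?_⟩
    by_contra hlt
    have hidx : (pvRankToDim capacity).idxOf d < k := pv_idxOf_lt_of_mem_take _ k d hd
    have h2 := hpre d.toNat (by omega) (by omega)
    rw [show ((d.toNat : Nat) : Int) = d by omega] at h2
    have h3 : pvCapRank capacity d = (pvRankToDim capacity).idxOf d :=
      (pv_idxOf_rankToDim capacity d hdm).symm
    omega
  rw [pv_mapM_eq_map W _ (fun d => (((PySem.List.pyRange 0 (item.length : Int)).countP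
        (fun e => pvR item e d) : Nat) : Int)) ?_,
      pv_mapM_eq_map W _ (fun d => (((PySem.List.pyRange 0 (item.length : Int)).countP
        (fun e => pvR item e d) : Nat) : Int)) ?_]
  · intro d hd
    obtain ⟨h0, h1⟩ := hbound d hd
    rw [PySem.List.pyGet?_of_nonneg _ h0,
        List.getElem?_eq_getElem (by omega : d.toNat < item.length)]
    simp only [Option.map_some]
    congr 2
    simp only [pvR, PySem.List.pyGetD_eq_getElem item 0 h0 h1]
  · intro d hd
    obtain ⟨h0, h1⟩ := hbound d hd
    exact pv_dimToRank_get item d h0 h1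

-- ===== VERDICT (by name: the statement is the Claim_ definition above) =====
theorem pp_select_spec : Claim_equal_pp_select := by
  intro item capacity window_size _ hpre
  unfold Spec_pp_select pp_select pp_select_alt
  match window_size with
  | none =>
      simp only
      apply pv_body_eq
      intro d hd hmd
      rcases hpre with h | h
      · simp at h
      · simpa using h d hd hmd
  | some ws =>
      by_cases hws : ws = 0
      · simp [hws]
      · simp only [if_neg hws]
        apply pv_body_eq
        intro d hd hmd
        rcases hpre with h | h
        · simp at h; exact absurd h hws
        · simpa using h d hd hmd
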